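-- pv_equiv track=rewrite | github.com/amyteq/tt_share | a09/P10hb_v4_a8.py | minimal_s_for_c
-- ===== SOURCE A (Python) =====
-- def minimal_s_for_c(c):
--     target = c + 1
--     # search s from 3 upwards
--     max_s = 1000000  # generous
--     best_s = None
--     best_ratio = None
--     for s in range(3, max_s+1):
--         if s % 2 == 1:
--             d = 3*s + 2
--         else:
--             k = s//2
--             d = 3*k + 1
--         if target % d == 0:
--             # found
--             best_s = s
--             break
--     return best_s
-- ===== SOURCE B (Python) =====
-- def _inv(d):
--     # inverse of the s -> d map: odd s gives d = 3*s + 2, even s gives d = 3*(s//2) + 1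
--     if d % 3 == 2:
--         s = (d - 2) // 3
--         if s >= 3 and s % 2 == 1:
--             return s
--     elif d % 3 == 1:
--         k = (d - 1) // 3
--         if k >= 2:
--             return 2 * k
--     return None
--
-- def minimal_s_for_c(c):
--     target = c + 1
--     if target == 0:
--         return 3  # every d divides 0, so the very first s = 3 works
--     n = abs(target)
--     cands = []
--     i = 1
--     while i * i <= n:
--         if n % i == 0:
--             for d in (i, n // i):
--                 s = _inv(d)
--                 if s is not None and s <= 1000000:
--                     cands.append(s)
--         i += 1
--     return min(cands) if cands else None
-- ===== Notes on version B (the rewrite author's own statement) =====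
-- stated objective: faster
-- what changed: Instead of scanning the candidate values s in increasing order and testing whether the derived divisor d(s) divides the target, B enumerates the divisors of the absolute target by trial division up to its square root, inverts the per-parity map from s to d(s) to get the candidate s values, and returns the minimum candidate; a zero target is answered directly by the smallest s of A's scan.
import Mathlib
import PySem

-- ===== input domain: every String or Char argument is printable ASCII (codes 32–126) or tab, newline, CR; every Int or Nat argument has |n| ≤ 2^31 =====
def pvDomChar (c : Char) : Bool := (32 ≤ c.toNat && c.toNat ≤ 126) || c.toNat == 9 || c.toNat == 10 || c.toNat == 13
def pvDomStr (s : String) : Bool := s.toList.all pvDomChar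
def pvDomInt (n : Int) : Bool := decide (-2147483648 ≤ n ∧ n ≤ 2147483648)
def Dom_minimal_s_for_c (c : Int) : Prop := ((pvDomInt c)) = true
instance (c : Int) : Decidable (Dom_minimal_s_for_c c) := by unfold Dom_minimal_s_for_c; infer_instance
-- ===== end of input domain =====

-- B replaces A's linear scan over s = 3..10^6 by trial-division enumeration of the divisors of
-- |c+1|, inverting the s ↦ d map per parity and taking the minimum candidate (objective: faster).

-- ===== PORT A =====
-- the if/else branch of A's loop body computing d from s
def pvD (s : Int) : Int :=
  if PySem.Int.mod s 2 = 1 then 3 * s + 2 else 3 * (PySem.Int.floordiv s 2) + 1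

-- A's 'for s in range(3, max_s+1): … break' search loop
def pvALoop (target : Int) : List Int → Option Int
  | [] => none
  | s :: rest =>
    if PySem.Int.mod target (pvD s) = 0 then some s else pvALoop target rest

def minimal_s_for_c (c : Int) : Option Int :=
  pvALoop (c + 1) (PySem.List.pyRange 3 (1000000 + 1) 1)


-- ===== PORT B =====
-- Source B's _inv: inverse of the s ↦ d map
def pvInv (d : Int) : Option Int :=
  if PySem.Int.mod d 3 = 2 then
    if 3 ≤ PySem.Int.floordiv (d - 2) 3 ∧ PySem.Int.mod (PySem.Int.floordiv (d - 2) 3) 2 = 1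
    then some (PySem.Int.floordiv (d - 2) 3) else none
  else if PySem.Int.mod d 3 = 1 then
    if 2 ≤ PySem.Int.floordiv (d - 1) 3 then some (2 * PySem.Int.floordiv (d - 1) 3) else none
  else none
-- body of Source B's 'for d in (i, n // i)' iteration
def pvAddCand (acc : List Int) (d : Int) : List Int :=
  match pvInv d with
  | some s => if s ≤ 1000000 then acc ++ [s] else acc
  | none => acc
-- Source B's 'while i * i <= n' trial-division loop collecting candidate s values
def pvBLoop (n i : Int) (cands : List Int) : List Int :=
  if h : i * i ≤ n then
    let cands' := if PySem.Int.mod n i = 0 then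
        [i, PySem.Int.floordiv n i].foldl pvAddCand cands
      else cands
    pvBLoop n (i + 1) cands'
  else cands
termination_by (n + 1 - i).toNat
decreasing_by
  have h1 : i ≤ i * i := by
    rcases le_total i 0 with h' | h'
    · nlinarith
    · nlinarith
  have h2 : i ≤ n := le_trans h1 h
  omega




def minimal_s_for_c_alt (c : Int) : Option Int :=
  let target := c + 1
  if target = 0 then some 3
  else
    let n := |target|
    let cands := pvBLoop n 1 []
    PySem.List.min? cands (fun x => x)

-- ===== PRECONDITION & SPEC =====
def Spec_minimal_s_for_c (c : Int) (out : Option Int) : Prop := out = minimal_s_for_c_alt c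
instance (c : Int) (out : Option Int) : Decidable (Spec_minimal_s_for_c c out) := by unfold Spec_minimal_s_for_c; infer_instance

-- ===== CLAIM (what is proved, stated in full; the proofs are below) =====
def Claim_equal_minimal_s_for_c : Prop := ∀ (c : Int), Dom_minimal_s_for_c c → Spec_minimal_s_for_c c (minimal_s_for_c c)

-- ===== LEMMAS AND PROOFS =====

-- the set both programs search: s in A's range whose derived divisor divides the target
def pvS (t s : Int) : Prop := 3 ≤ s ∧ s ≤ 1000000 ∧ pvD s ∣ t

theorem pvmod2 (a : Int) : PySem.Int.mod a 2 = a % 2 := PySem.Int.mod_eq_emod_of_pos (by norm_num)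

theorem mem_pvAddCand (acc : List Int) (d s : Int) :
    s ∈ pvAddCand acc d ↔ s ∈ acc ∨ (pvInv d = some s ∧ s ≤ 1000000) := by
  rcases h : pvInv d with _ | v <;> simp only [pvAddCand, h]
  · simp
  · split_ifs with hv <;> simp_all
    · constructor
      · rintro (hs | rfl)
        · exact Or.inl hs
        · exact Or.inr ⟨rfl, hv⟩
      · rintro (hs | ⟨rfl, _⟩)
        · exact Or.inl hs
        · exact Or.inr rfl
    · rintro rfl
      omega

theorem pvBLoop_step (n i : Int) (acc : List Int) (h : i * i ≤ n) :
    pvBLoop n i acc = pvBLoop n (i + 1)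
      (if PySem.Int.mod n i = 0 then [i, PySem.Int.floordiv n i].foldl pvAddCand acc else acc) := by
  rw [pvBLoop]
  simp only [dif_pos h]

theorem pvBLoop_stop (n i : Int) (acc : List Int) (h : ¬ i * i ≤ n) :
    pvBLoop n i acc = acc := by
  rw [pvBLoop]
  simp only [dif_neg h]

theorem mem_pvBLoop (n : Int) (i : Int) (acc : List Int) (s : Int) :
    1 ≤ i → (s ∈ pvBLoop n i acc ↔
      s ∈ acc ∨ ∃ d e : Int, 1 ≤ d ∧ 1 ≤ e ∧ d * e = n ∧ i ≤ d ∧ i ≤ e ∧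
        pvInv d = some s ∧ s ≤ 1000000) := by
  induction i, acc using pvBLoop.induct (n := n) with
  | case1 i acc h cands2 ih =>
    intro hi
    have hii : i ≤ i * i := by nlinarith
    have hin : i ≤ n := le_trans hii h
    rw [pvBLoop_step n i acc h]
    simp only [cands2, dite_eq_ite] at ih
    rw [ih (by omega)]
    by_cases hm : PySem.Int.mod n i = 0
    · have hdvd : i ∣ n := (PySem.Int.mod_eq_zero_iff_dvd n i).mp hm
      have hfd : PySem.Int.floordiv n i = n / i := PySem.Int.floordiv_eq_ediv_of_pos (by omega)
      have hq1 : 1 ≤ n / i := (Int.le_ediv_iff_mul_le (by omega)).mpr (by omega)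
      have hqi : i ≤ n / i := (Int.le_ediv_iff_mul_le (by omega)).mpr h
      have hmul : i * (n / i) = n := Int.mul_ediv_cancel' hdvd
      have hmul2 : (n / i) * i = n := Int.ediv_mul_cancel hdvd
      simp only [if_pos hm, List.foldl, hfd, mem_pvAddCand]
      constructor
      · rintro ((((hs | h1) | h2) | ⟨d, e, hd, he, hde, hid, hie, hinv, hsM⟩))
        · exact Or.inl hs
        · exact Or.inr ⟨i, n / i, by omega, hq1, hmul, le_refl i, hqi, h1.1, h1.2⟩
        · exact Or.inr ⟨n / i, i, hq1, by omega, hmul2, hqi, le_refl i, h2.1, h2.2⟩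
        · exact Or.inr ⟨d, e, hd, he, hde, by omega, by omega, hinv, hsM⟩
      · rintro (hs | ⟨d, e, hd, he, hde, hid, hie, hinv, hsM⟩)
        · exact Or.inl (Or.inl (Or.inl hs))
        · by_cases hdi : d = i
          · exact Or.inl (Or.inl (Or.inr ⟨hdi ▸ hinv, hsM⟩))
          · by_cases hei : e = i
            · have : d = n / i := by
                rw [← hde, hei, Int.mul_ediv_cancel d (by omega : i ≠ 0)]
              exact Or.inl (Or.inr ⟨this ▸ hinv, hsM⟩)
            · exact Or.inr ⟨d, e, hd, he, hde, by omega, by omega, hinv, hsM⟩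
    · simp only [if_neg hm]
      constructor
      · rintro (hs | ⟨d, e, hd, he, hde, hid, hie, hinv, hsM⟩)
        · exact Or.inl hs
        · exact Or.inr ⟨d, e, hd, he, hde, by omega, by omega, hinv, hsM⟩
      · rintro (hs | ⟨d, e, hd, he, hde, hid, hie, hinv, hsM⟩)
        · exact Or.inl hs
        · have hdi : d ≠ i := by
            rintro rfl
            exact hm ((PySem.Int.mod_eq_zero_iff_dvd n d).mpr ⟨e, hde.symm⟩)
          have hei : e ≠ i := by
            rintro rfl
            exact hm ((PySem.Int.mod_eq_zero_iff_dvd n e).mpr ⟨d, by rw [← hde, mul_comm]⟩)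
          exact Or.inr ⟨d, e, hd, he, hde, by omega, by omega, hinv, hsM⟩
  | case2 i acc h =>
    intro hi
    rw [pvBLoop_stop n i acc h]
    constructor
    · exact Or.inl
    · rintro (hs | ⟨d, e, hd, he, hde, hid, hie, hinv, hsM⟩)
      · exact hs
      · exact absurd hde (by nlinarith)
theorem pvD_pos (s : Int) (h : 3 ≤ s) : 1 ≤ pvD s := by
  unfold pvD
  simp only [pvmod2, PySem.Int.floordiv_eq_ediv_of_pos (by norm_num : (0:Int) < 2)]
  split_ifs <;> omega

theorem pvmod3 (a : Int) : PySem.Int.mod a 3 = a % 3 := PySem.Int.mod_eq_emod_of_pos (by norm_num)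
theorem pvdiv2 (a : Int) : PySem.Int.floordiv a 2 = a / 2 := PySem.Int.floordiv_eq_ediv_of_pos (by norm_num)
theorem pvdiv3 (a : Int) : PySem.Int.floordiv a 3 = a / 3 := PySem.Int.floordiv_eq_ediv_of_pos (by norm_num)

theorem pvInv_sound (d s : Int) (h : pvInv d = some s) : 3 ≤ s ∧ pvD s = d := by
  unfold pvInv at h
  unfold pvD
  simp only [pvmod2, pvmod3, pvdiv2, pvdiv3] at h ⊢
  split_ifs at h <;> simp only [Option.some.injEq] at h <;> split_ifs <;> omega

theorem pvInv_complete (s : Int) (h : 3 ≤ s) : pvInv (pvD s) = some s := by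
  unfold pvInv pvD
  simp only [pvmod2, pvmod3, pvdiv2, pvdiv3]
  split_ifs <;> first
    | rfl
    | (simp only [Option.some.injEq]; omega)
    | omega

theorem pvALoop_some (t : Int) (l : List Int) (hl : l.Pairwise (· < ·)) (s : Int)
    (h : pvALoop t l = some s) :
    s ∈ l ∧ pvD s ∣ t ∧ ∀ y ∈ l, pvD y ∣ t → s ≤ y := by
  induction l with
  | nil => simp [pvALoop] at h
  | cons a rest ih =>
    rw [List.pairwise_cons] at hl
    rw [pvALoop] at h
    by_cases hc : PySem.Int.mod t (pvD a) = 0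
    · rw [if_pos hc] at h
      obtain rfl : a = s := by injection h
      refine ⟨List.mem_cons_self, (PySem.Int.mod_eq_zero_iff_dvd t (pvD a)).mp hc, ?_⟩
      intro y hy _
      rcases List.mem_cons.mp hy with rfl | hy'
      · exact le_refl _
      · exact le_of_lt (hl.1 y hy')
    · rw [if_neg hc] at h
      obtain ⟨hmem, hdvd, hmin⟩ := ih hl.2 h
      refine ⟨List.mem_cons_of_mem a hmem, hdvd, ?_⟩
      intro y hy hyd
      rcases List.mem_cons.mp hy with rfl | hy'
      · exact (hc ((PySem.Int.mod_eq_zero_iff_dvd t (pvD y)).mpr hyd)).elim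
      · exact hmin y hy' hyd

theorem pvALoop_none (t : Int) (l : List Int) (h : pvALoop t l = none) :
    ∀ y ∈ l, ¬ pvD y ∣ t := by
  induction l with
  | nil => simp
  | cons a rest ih =>
    rw [pvALoop] at h
    by_cases hc : PySem.Int.mod t (pvD a) = 0
    · rw [if_pos hc] at h; exact absurd h (by simp)
    · rw [if_neg hc] at h
      intro y hy
      rcases List.mem_cons.mp hy with rfl | hy'
      · exact fun hyd => hc ((PySem.Int.mod_eq_zero_iff_dvd t (pvD y)).mpr hyd)
      · exact ih h y hy'
theorem mem_cands_iff (t : Int) (ht : t ≠ 0) (s : Int) :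
    s ∈ pvBLoop |t| 1 [] ↔ pvS t s := by
  have hn1 : 1 ≤ |t| := Int.one_le_abs ht
  rw [mem_pvBLoop |t| 1 [] s (le_refl 1)]
  simp only [List.not_mem_nil, false_or]
  constructor
  · rintro ⟨d, e, hd, he, hde, _, _, hinv, hsM⟩
    obtain ⟨hs3, hDd⟩ := pvInv_sound d s hinv
    exact ⟨hs3, hsM, (dvd_abs (pvD s) t).mp (hDd ▸ ⟨e, hde.symm⟩)⟩
  · rintro ⟨hs3, hsM, hdvd⟩
    have hDpos : 1 ≤ pvD s := pvD_pos s hs3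
    have habs : pvD s ∣ |t| := (dvd_abs (pvD s) t).mpr hdvd
    refine ⟨pvD s, |t| / pvD s, hDpos, ?_, Int.mul_ediv_cancel' habs, hDpos, ?_, ?_, hsM⟩
    · exact (Int.le_ediv_iff_mul_le (by omega)).mpr (by simpa using Int.le_of_dvd (by omega) habs)
    · exact (Int.le_ediv_iff_mul_le (by omega)).mpr (by simpa using Int.le_of_dvd (by omega) habs)
    · rw [pvInv_complete s hs3]

theorem main_eq (c : Int) : minimal_s_for_c c = minimal_s_for_c_alt c := by
  by_cases ht : c + 1 = 0
  · have hA : minimal_s_for_c c = some 3 := by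
      unfold minimal_s_for_c
      rw [ht, PySem.List.pyRange_one_cons (by norm_num)]
      rw [pvALoop, if_pos (by decide)]
    rw [hA]
    simp [minimal_s_for_c_alt, ht]
  · have hAlt : minimal_s_for_c_alt c = PySem.List.min? (pvBLoop |c + 1| 1 []) (fun x => x) := by
      simp [minimal_s_for_c_alt, ht]
    have hpw : (PySem.List.pyRange 3 (1000000 + 1) 1).Pairwise (· < ·) :=
      PySem.List.pairwise_lt_pyRange_one 3 (1000000 + 1)
    have hAdef : minimal_s_for_c c = pvALoop (c + 1) (PySem.List.pyRange 3 (1000000 + 1) 1) := rfl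
    rw [hAdef]
    rcases hB : PySem.List.min? (pvBLoop |c + 1| 1 []) (fun x => x) with _ | m
    · have hempty : pvBLoop |c + 1| 1 [] = [] := (PySem.List.min?_eq_none_iff _ _).mp hB
      rcases hA : pvALoop (c + 1) (PySem.List.pyRange 3 (1000000 + 1) 1) with _ | s
      · rw [hAlt, hB]
      · exfalso
        obtain ⟨hmem, hdvd, _⟩ := pvALoop_some (c + 1) _ hpw s hA
        rw [PySem.List.mem_pyRange_one] at hmem
        have : s ∈ pvBLoop |c + 1| 1 [] :=
          (mem_cands_iff (c + 1) ht s).mpr ⟨by omega, by omega, hdvd⟩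
        rw [hempty] at this
        exact absurd this (List.not_mem_nil)
    · have hmS : pvS (c + 1) m := (mem_cands_iff (c + 1) ht m).mp (PySem.List.min?_mem hB)
      obtain ⟨hm3, hmM, hmdvd⟩ := hmS
      have hmin : ∀ y ∈ pvBLoop |c + 1| 1 [], m ≤ y := fun y hy => by
        simpa using PySem.List.min?_isMin hB y hy
      rcases hA : pvALoop (c + 1) (PySem.List.pyRange 3 (1000000 + 1) 1) with _ | s
      · exfalso
        have := pvALoop_none (c + 1) _ hA m
          (by rw [PySem.List.mem_pyRange_one]; omega)
        exact this hmdvd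
      · rw [hAlt, hB]
        obtain ⟨hmem, hdvd, hminA⟩ := pvALoop_some (c + 1) _ hpw s hA
        rw [PySem.List.mem_pyRange_one] at hmem
        have h1 : s ≤ m := hminA m (by rw [PySem.List.mem_pyRange_one]; omega) hmdvd
        have h2 : m ≤ s := hmin s ((mem_cands_iff (c + 1) ht s).mpr ⟨by omega, by omega, hdvd⟩)
        exact congrArg some (le_antisymm h1 h2)

-- ===== VERDICT (by name: the statement is the Claim_ definition above) =====
theorem minimal_s_for_c_spec : Claim_equal_minimal_s_for_c := by
  intro c _
  unfold Spec_minimal_s_for_c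
  exact main_eq c
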